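-- pv_equiv track=rewrite | github.com/andreeabiancabizau/SAT-Algorithm | SAT.py | resolution_simple
-- ===== SOURCE A (Python) =====
-- from typing import List, Dict, Optional, Tuple
--
-- def resolution_simple(clauses: List[List[int]]) -> bool:
--     new = set()
--     clauses_set = [frozenset(c) for c in clauses]
--
--     while True:
--         pairs = [(clauses_set[i], clauses_set[j]) for i in range(len(clauses_set)) for j in range(i + 1, len(clauses_set))]
--         for ci, cj in pairs:
--             for lit in ci:
--                 if -lit in cj:
--                     resolvent = (ci - {lit}) | (cj - {-lit})
--                     if not resolvent:
--                         return False
--                     new.add(frozenset(resolvent))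
--         if new.issubset(set(clauses_set)):
--             return True
--         clauses_set.extend(c for c in new if c not in clauses_set)
--         new.clear()
-- ===== SOURCE B (Python) =====
-- def resolution_simple(clauses):
--     # Given-clause worklist with a literal index: each clause is processed once,
--     # resolved only against the already-processed clauses holding a complementary
--     # literal (found through the index); no round-based rescans of all pairs.
--     queue = [frozenset(c) for c in clauses]
--     seen = set(queue)
--     index = {}
--     k = 0
--     while k < len(queue):
--         g = queue[k]
--         k += 1
--         for lit in g:
--             for h in index.get(-lit, ()):
--                 resolvent = (g - {lit}) | (h - {-lit})
--                 if not resolvent: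
--                     return False
--                 if resolvent not in seen:
--                     seen.add(resolvent)
--                     queue.append(resolvent)
--         for lit in g:
--             index.setdefault(lit, []).append(g)
--     return True
-- ===== Notes on version B (the rewrite author's own statement) =====
-- stated objective: alternative
-- what changed: A saturates by rescanning ALL clause pairs every round and testing a subset fixpoint; B is a given-clause worklist: each clause is dequeued and processed exactly once, resolved only against already-processed clauses that hold a complementary literal, found through a literal-indexed dictionary, so no pair is ever resolved twice.
import Mathlib
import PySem

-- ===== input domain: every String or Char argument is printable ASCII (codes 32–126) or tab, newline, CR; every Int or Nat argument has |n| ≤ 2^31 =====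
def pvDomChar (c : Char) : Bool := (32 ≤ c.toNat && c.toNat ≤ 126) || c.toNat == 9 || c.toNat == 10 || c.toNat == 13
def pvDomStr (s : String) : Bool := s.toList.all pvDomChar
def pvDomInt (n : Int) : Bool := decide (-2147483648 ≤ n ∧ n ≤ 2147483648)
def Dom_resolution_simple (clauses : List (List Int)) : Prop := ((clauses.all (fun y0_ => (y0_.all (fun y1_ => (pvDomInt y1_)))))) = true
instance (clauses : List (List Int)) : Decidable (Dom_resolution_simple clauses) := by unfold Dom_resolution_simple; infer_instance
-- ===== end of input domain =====

-- B replaces A's round-based saturation (rescan ALL clause pairs each round, subset test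
-- for the fixpoint) by a given-clause worklist: each clause is dequeued once and resolved
-- only against already-processed clauses found through a literal-indexed dictionary.
-- Same Bool result. Both Python loops are `while`-loops; the ports use a provably
-- sufficient fuel bound (|clauses| + 2^#literals + …) purely as a totality guard.

-- ===== PORT A =====
-- frozenset(c) : canonical representation as the strictly increasing list of distinct elements
def pvFzA (c : List Int) : List Int := PySem.List.sorted (PySem.List.dedup c) (fun x => x) false

-- (ci - {lit}) | (cj - {-lit}) as a canonical frozenset
def pvResA (ci cj : List Int) (lit : Int) : List Int :=
  pvFzA (ci.filter (fun x => x != lit) ++ cj.filter (fun x => x != (-lit)))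

-- new.add(frozenset(resolvent))
def pvAddNewA (acc : List (List Int)) (r : List Int) : List (List Int) :=
  if acc.contains r then acc else acc ++ [r]

-- for lit in ci: if -lit in cj: … (none = the `return False` early exit)
def pvLitsA (ci cj : List Int) : List Int → List (List Int) → Option (List (List Int))
  | [], acc => some acc
  | l :: ls, acc =>
    if cj.contains (-l) then
      let r := pvResA ci cj l
      if r = [] then none
      else pvLitsA ci cj ls (pvAddNewA acc r)
    else pvLitsA ci cj ls acc

-- the `pairs` comprehension: all (clauses_set[i], clauses_set[j]) with i < j
def pvPairsA (s : List (List Int)) : List (List Int × List Int) :=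
  (List.range s.length).flatMap (fun i =>
    (List.range' (i + 1) (s.length - (i + 1))).map (fun j => (s.getD i [], s.getD j [])))

-- for ci, cj in pairs: …
def pvScanA : List (List Int × List Int) → List (List Int) → Option (List (List Int))
  | [], acc => some acc
  | (ci, cj) :: ps, acc =>
    match pvLitsA ci cj ci acc with
    | none => none
    | some acc' => pvScanA ps acc'

-- the while-True loop (fuel is only a totality guard)
def pvLoopA : Nat → List (List Int) → Bool
  | 0, _ => true
  | fuel + 1, s =>
    match pvScanA (pvPairsA s) [] with
    | none => false
    | some new =>
      if new.all (fun c => s.contains c) then true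
      else pvLoopA fuel (s ++ new.filter (fun c => !s.contains c))

def resolution_simple (clauses : List (List Int)) : Bool :=
  let s := clauses.map pvFzA
  pvLoopA (2 ^ (pvFzA clauses.flatten).length + s.length + 2) s

-- ===== PORT B =====
def pvFzB (c : List Int) : List Int := PySem.List.sorted (PySem.List.dedup c) (fun x => x) false

-- (g - {lit}) | (h - {-lit}) as a canonical frozenset
def pvResB (g h : List Int) (lit : Int) : List Int :=
  pvFzB (g.filter (fun x => x != lit) ++ h.filter (fun x => x != (-lit)))

-- for h in index.get(-lit, ()): …  — state (seen, queue tail of fresh clauses);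
-- none = the `return False` early exit
def pvBucketB (g : List Int) (l : Int) :
    List (List Int) → List (List Int) × List (List Int) → Option (List (List Int) × List (List Int))
  | [], st => some st
  | h :: hs, (seen, nq) =>
    let r := pvResB g h l
    if r = [] then none
    else if PySem.Set.contains seen r then pvBucketB g l hs (seen, nq)
    else pvBucketB g l hs (PySem.Set.add seen r, nq ++ [r])

-- for lit in g: …
def pvLitsB (idx : PySem.Dict Int (List (List Int))) (g : List Int) :
    List Int → List (List Int) × List (List Int) → Option (List (List Int) × List (List Int))
  | [], st => some st
  | l :: ls, st =>
    match pvBucketB g l (idx.getD (-l) []) st with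
    | none => none
    | some st' => pvLitsB idx g ls st'

-- for lit in g: index.setdefault(lit, []).append(g)
def pvIndexAddB (idx : PySem.Dict Int (List (List Int))) (g : List Int) :
    PySem.Dict Int (List (List Int)) :=
  g.foldl (fun d l => d.insert l (d.getD l [] ++ [g])) idx

-- while k < len(queue): g = queue[k]; k += 1; … (pending = queue[k:]; fuel is only a totality guard)
def pvLoopB : Nat → List (List Int) → PySem.Dict Int (List (List Int)) → List (List Int) → Bool
  | 0, _, _, _ => true
  | _ + 1, [], _, _ => true
  | fuel + 1, g :: pend, idx, seen =>
    match pvLitsB idx g g (seen, []) with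
    | none => false
    | some (seen', nq) => pvLoopB fuel (pend ++ nq) (pvIndexAddB idx g) seen'

def resolution_simple_alt (clauses : List (List Int)) : Bool :=
  let q := clauses.map pvFzB
  pvLoopB (q.length + 2 ^ (pvFzB clauses.flatten).length + 1) q PySem.Dict.empty (PySem.Set.ofList q)

-- ===== PRECONDITION & SPEC =====
def Spec_resolution_simple (clauses : List (List Int)) (out : Bool) : Prop := out = resolution_simple_alt clauses
instance (clauses : List (List Int)) (out : Bool) : Decidable (Spec_resolution_simple clauses out) := by unfold Spec_resolution_simple; infer_instance

-- ===== CLAIM (what is proved, stated in full; the proofs are below) =====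
def Claim_equal_resolution_simple : Prop := ∀ (clauses : List (List Int)), Dom_resolution_simple clauses → Spec_resolution_simple clauses (resolution_simple clauses)

-- ===== LEMMAS AND PROOFS =====

-- B's frozenset arithmetic is A's (same Python expressions)
theorem pvResB_eq : pvResB = pvResA := rfl

-- strictly sorted (canonical) clause lists
def pvStrict (c : List Int) : Prop := c.Pairwise (· < ·)

theorem pvFz_strict (c : List Int) : pvStrict (pvFzA c) := by
  simpa [pvFzA, pvStrict, PySem.List.dedup_eq_ofList] using
    PySem.List.sorted_ofList_pairwise_lt (xs := c)

theorem mem_pvFz (x : Int) (c : List Int) : x ∈ pvFzA c ↔ x ∈ c := by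
  simp [pvFzA, PySem.List.mem_sorted]

-- two strictly increasing lists with the same members are equal
theorem pvStrict_ext {a b : List Int} (ha : pvStrict a) (hb : pvStrict b)
    (h : ∀ x, x ∈ a ↔ x ∈ b) : a = b := by
  have hna : a.Nodup := ha.nodup
  have hnb : b.Nodup := hb.nodup
  have hperm : a.Perm b := (List.perm_ext_iff_of_nodup hna hnb).2 h
  exact hperm.eq_of_pairwise
    (fun x y _ _ hxy hyx => absurd hyx (lt_asymm hxy)) ha hb

theorem mem_pvRes (x : Int) (ci cj : List Int) (l : Int) :
    x ∈ pvResA ci cj l ↔ ((x ∈ ci ∧ x ≠ l) ∨ (x ∈ cj ∧ x ≠ -l)) := by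
  simp [pvResA, mem_pvFz, List.mem_filter, bne_iff_ne]

theorem pvRes_strict (ci cj : List Int) (l : Int) : pvStrict (pvResA ci cj l) := pvFz_strict _

theorem pvRes_comm (ci cj : List Int) (l : Int) : pvResA cj ci (-l) = pvResA ci cj l := by
  refine pvStrict_ext (pvRes_strict _ _ _) (pvRes_strict _ _ _) (fun x => ?_)
  rw [mem_pvRes, mem_pvRes, neg_neg]
  tauto

-- ===== the shared specification: position-aware resolution derivability =====

-- two clauses may be paired iff they are different clauses, or one clause value
-- occupying two positions of the initial list
def pvOk (s0 : List (List Int)) (C D : List Int) : Prop := C ≠ D ∨ 2 ≤ s0.count C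

inductive pvDer (s0 : List (List Int)) : List Int → Prop
  | base {C} : C ∈ s0 → pvDer s0 C
  | step {C D l} : pvDer s0 C → pvDer s0 D → pvOk s0 C D → l ∈ C → (-l) ∈ D →
      pvResA C D l ≠ [] → pvDer s0 (pvResA C D l)

-- the empty clause is reachable: both programs return False exactly here
def pvED (s0 : List (List Int)) : Prop :=
  ∃ C D l, pvDer s0 C ∧ pvDer s0 D ∧ pvOk s0 C D ∧ l ∈ C ∧ (-l) ∈ D ∧ pvResA C D l = []

-- ===== position and duplicate bookkeeping =====

theorem pv_pos_of_mem {t : List (List Int)} {C : List Int} (h : C ∈ t) :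
    ∃ i, i < t.length ∧ t.getD i [] = C := by
  obtain ⟨i, hi, hEq⟩ := List.mem_iff_getElem.1 h
  exact ⟨i, hi, by rw [List.getD_eq_getElem t [] hi]; exact hEq⟩

theorem pv_mem_of_pos {t : List (List Int)} {i : Nat} (h : i < t.length) :
    t.getD i [] ∈ t := by
  rw [List.getD_eq_getElem t [] h]
  exact List.getElem_mem h

theorem pv_two_pos_of_count {s0 : List (List Int)} {C : List Int} (h : 2 ≤ s0.count C) :
    ∃ i j, i < j ∧ j < s0.length ∧ s0.getD i [] = C ∧ s0.getD j [] = C := by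
  induction s0 with
  | nil => simp at h
  | cons x xs ih =>
    by_cases hx : x = C
    · subst hx
      have hc : 1 ≤ xs.count x := by
        have : (x :: xs).count x = xs.count x + 1 := List.count_cons_self
        omega
      have hmem : x ∈ xs := List.count_pos_iff.1 (by omega)
      obtain ⟨j, hj, hEq⟩ := pv_pos_of_mem hmem
      exact ⟨0, j + 1, by omega, by simpa using hj, rfl, by simpa using hEq⟩
    · have hc : 2 ≤ xs.count C := by
        have : (x :: xs).count C = xs.count C := List.count_cons_of_ne hx
        omega
      obtain ⟨i, j, hij, hj, h1, h2⟩ := ih hc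
      exact ⟨i + 1, j + 1, by omega, by simpa using hj, by simpa using h1, by simpa using h2⟩

theorem pv_count_of_two_pos {s0 : List (List Int)} {i j : Nat} (hij : i < j)
    (hj : j < s0.length) (hEq : s0.getD i [] = s0.getD j []) :
    2 ≤ s0.count (s0.getD i []) := by
  induction s0 generalizing i j with
  | nil => simp at hj
  | cons x xs ih =>
    cases i with
    | zero =>
      cases j with
      | zero => omega
      | succ j' =>
        have hj' : j' < xs.length := by simpa using hj
        simp only [List.getD_cons_zero, List.getD_cons_succ] at hEq ⊢
        have hxs : x ∈ xs := by
          rw [hEq]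
          exact pv_mem_of_pos hj'
        have h1 : 1 ≤ xs.count x := List.count_pos_iff.2 hxs
        have h2 : (x :: xs).count x = xs.count x + 1 := List.count_cons_self
        omega
    | succ i' =>
      cases j with
      | zero => omega
      | succ j' =>
        have hj' : j' < xs.length := by simpa using hj
        simp only [List.getD_cons_succ] at hEq ⊢
        have := ih (i := i') (j := j') (by omega) hj' hEq
        rw [List.count_cons]
        omega

theorem pv_dup_prefix {s0C e t : List (List Int)} (ht : t = s0C ++ e) (hnd : e.Nodup)
    (hfresh : ∀ x ∈ e, x ∉ s0C) {i j : Nat} (hij : i < j) (hj : j < t.length)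
    (hEq : t.getD i [] = t.getD j []) : 2 ≤ s0C.count (t.getD i []) := by
  subst ht
  by_cases hjn : j < s0C.length
  · have hin : i < s0C.length := by omega
    rw [List.getD_append _ _ _ _ hin] at hEq ⊢
    rw [List.getD_append _ _ _ _ hjn] at hEq
    exact pv_count_of_two_pos hij hjn hEq
  · have hjlen : s0C.length ≤ j := by omega
    have hje : (s0C ++ e).getD j [] = e.getD (j - s0C.length) [] :=
      List.getD_append_right _ _ _ _ hjlen
    have hjlt : j - s0C.length < e.length := by
      have := List.length_append (as := s0C) (bs := e)
      omega
    by_cases hin : i < s0C.length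
    · exfalso
      rw [List.getD_append _ _ _ _ hin, hje] at hEq
      have hmemE : e.getD (j - s0C.length) [] ∈ e := pv_mem_of_pos hjlt
      have hmemS : e.getD (j - s0C.length) [] ∈ s0C := hEq ▸ pv_mem_of_pos hin
      exact hfresh _ hmemE hmemS
    · exfalso
      have hilen : s0C.length ≤ i := by omega
      have hie : (s0C ++ e).getD i [] = e.getD (i - s0C.length) [] :=
        List.getD_append_right _ _ _ _ hilen
      have hilt : i - s0C.length < e.length := by omega
      rw [hie, hje] at hEq
      rw [List.getD_eq_getElem e [] hilt, List.getD_eq_getElem e [] hjlt] at hEq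
      have := (List.Nodup.getElem_inj_iff hnd).1 hEq
      omega

theorem mem_pvPairsA {s : List (List Int)} {p : List Int × List Int} :
    p ∈ pvPairsA s ↔ ∃ i j, i < j ∧ j < s.length ∧ p = (s.getD i [], s.getD j []) := by
  simp only [pvPairsA, List.mem_flatMap, List.mem_range, List.mem_map, List.mem_range'_1]
  constructor
  · rintro ⟨i, hi, j, hj, rfl⟩
    exact ⟨i, j, by omega, by omega, rfl⟩
  · rintro ⟨i, j, hij, hj, rfl⟩
    exact ⟨i, by omega, j, by omega, rfl⟩

-- ===== A-side scan lemmas =====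

theorem pvLitsA_mono (ci cj : List Int) (ls : List Int) (acc acc' : List (List Int))
    (h : pvLitsA ci cj ls acc = some acc') : ∀ x ∈ acc, x ∈ acc' := by
  induction ls generalizing acc with
  | nil => simp only [pvLitsA] at h; cases h; exact fun x hx => hx
  | cons l ls ih =>
    simp only [pvLitsA] at h
    split_ifs at h with h1 h2
    · intro x hx
      refine ih _ h x ?_
      unfold pvAddNewA
      split_ifs <;> simp [hx]
    · exact ih _ h

theorem pvScanA_mono (ps : List (List Int × List Int)) (acc acc' : List (List Int))
    (h : pvScanA ps acc = some acc') : ∀ x ∈ acc, x ∈ acc' := by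
  induction ps generalizing acc with
  | nil => simp only [pvScanA] at h; cases h; exact fun x hx => hx
  | cons p ps ih =>
    obtain ⟨ci, cj⟩ := p
    simp only [pvScanA] at h
    cases hl : pvLitsA ci cj ci acc with
    | none => rw [hl] at h; cases h
    | some a1 =>
      rw [hl] at h
      exact fun x hx => ih _ h x (pvLitsA_mono ci cj ci acc a1 hl x hx)

theorem pv_mem_addNew_self (a : List (List Int)) (r : List Int) : r ∈ pvAddNewA a r := by
  unfold pvAddNewA
  split_ifs with h
  · exact List.contains_iff_mem.1 h
  · simp

theorem pvLitsA_cover (ci cj : List Int) (ls : List Int) (acc acc' : List (List Int))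
    (h : pvLitsA ci cj ls acc = some acc') :
    ∀ l ∈ ls, cj.contains (-l) = true → pvResA ci cj l ≠ [] ∧ pvResA ci cj l ∈ acc' := by
  induction ls generalizing acc with
  | nil => intro l hl; cases hl
  | cons x ls ih =>
    simp only [pvLitsA] at h
    intro l hl hc
    rcases List.mem_cons.1 hl with rfl | hmem
    · rw [if_pos hc] at h
      split_ifs at h with h2
      exact ⟨h2, pvLitsA_mono ci cj ls _ _ h _ (pv_mem_addNew_self acc _)⟩
    · split_ifs at h with h1 h2
      · exact ih _ h l hmem hc
      · exact ih _ h l hmem hc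

theorem pvScanA_cover (ps : List (List Int × List Int)) (acc acc' : List (List Int))
    (h : pvScanA ps acc = some acc') :
    ∀ p ∈ ps, ∀ l ∈ p.1, p.2.contains (-l) = true →
      pvResA p.1 p.2 l ≠ [] ∧ pvResA p.1 p.2 l ∈ acc' := by
  induction ps generalizing acc with
  | nil => intro p hp; cases hp
  | cons q ps ih =>
    obtain ⟨ci, cj⟩ := q
    simp only [pvScanA] at h
    cases hl : pvLitsA ci cj ci acc with
    | none => rw [hl] at h; cases h
    | some a1 =>
      rw [hl] at h
      intro p hp l hli hc
      rcases List.mem_cons.1 hp with rfl | hmem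
      · obtain ⟨hne, hm⟩ := pvLitsA_cover ci cj ci acc a1 hl l hli hc
        exact ⟨hne, pvScanA_mono ps a1 acc' h _ hm⟩
      · exact ih _ h p hmem l hli hc

theorem pvLitsA_none (ci cj : List Int) (ls : List Int) (acc : List (List Int))
    (h : pvLitsA ci cj ls acc = none) :
    ∃ l ∈ ls, cj.contains (-l) = true ∧ pvResA ci cj l = [] := by
  induction ls generalizing acc with
  | nil => simp [pvLitsA] at h
  | cons l ls ih =>
    simp only [pvLitsA] at h
    split_ifs at h with h1 h2
    · exact ⟨l, List.mem_cons_self, h1, h2⟩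
    · obtain ⟨l', hl', hc', he'⟩ := ih _ h
      exact ⟨l', List.mem_cons_of_mem _ hl', hc', he'⟩
    · obtain ⟨l', hl', hc', he'⟩ := ih _ h
      exact ⟨l', List.mem_cons_of_mem _ hl', hc', he'⟩

theorem pvScanA_none (ps : List (List Int × List Int)) (acc : List (List Int))
    (h : pvScanA ps acc = none) :
    ∃ p ∈ ps, ∃ l ∈ p.1, p.2.contains (-l) = true ∧ pvResA p.1 p.2 l = [] := by
  induction ps generalizing acc with
  | nil => simp [pvScanA] at h
  | cons q ps ih =>
    obtain ⟨ci, cj⟩ := q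
    simp only [pvScanA] at h
    cases hl : pvLitsA ci cj ci acc with
    | none =>
      obtain ⟨l, hl', hc, he⟩ := pvLitsA_none ci cj ci acc hl
      exact ⟨(ci, cj), List.mem_cons_self, l, hl', hc, he⟩
    | some a1 =>
      rw [hl] at h
      obtain ⟨p, hp, rest⟩ := ih _ h
      exact ⟨p, List.mem_cons_of_mem _ hp, rest⟩

theorem pvLitsA_some_mem (ci cj : List Int) (ls : List Int) (acc acc' : List (List Int))
    (h : pvLitsA ci cj ls acc = some acc') :
    ∀ x ∈ acc', x ∈ acc ∨ ∃ l ∈ ls, cj.contains (-l) = true ∧ x = pvResA ci cj l ∧ x ≠ [] := by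
  induction ls generalizing acc with
  | nil => simp only [pvLitsA] at h; cases h; exact fun x hx => Or.inl hx
  | cons l ls ih =>
    simp only [pvLitsA] at h
    split_ifs at h with h1 h2
    · intro x hx
      rcases ih _ h x hx with hin | ⟨l', hl', hc', he', hne'⟩
      · unfold pvAddNewA at hin
        split_ifs at hin with hctn
        · exact Or.inl hin
        · rcases List.mem_append.1 hin with hin | hin
          · exact Or.inl hin
          · have : x = pvResA ci cj l := List.mem_singleton.1 hin
            exact Or.inr ⟨l, List.mem_cons_self, h1, this, by rw [this]; exact h2⟩
      · exact Or.inr ⟨l', List.mem_cons_of_mem _ hl', hc', he', hne'⟩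
    · intro x hx
      rcases ih _ h x hx with hin | ⟨l', hl', hc', he', hne'⟩
      · exact Or.inl hin
      · exact Or.inr ⟨l', List.mem_cons_of_mem _ hl', hc', he', hne'⟩

theorem pvScanA_some_mem (ps : List (List Int × List Int)) (acc acc' : List (List Int))
    (h : pvScanA ps acc = some acc') :
    ∀ x ∈ acc', x ∈ acc ∨ ∃ p ∈ ps, ∃ l ∈ p.1, p.2.contains (-l) = true ∧ x = pvResA p.1 p.2 l ∧ x ≠ [] := by
  induction ps generalizing acc with
  | nil => simp only [pvScanA] at h; cases h; exact fun x hx => Or.inl hx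
  | cons q ps ih =>
    obtain ⟨ci, cj⟩ := q
    simp only [pvScanA] at h
    cases hl : pvLitsA ci cj ci acc with
    | none => rw [hl] at h; cases h
    | some a1 =>
      rw [hl] at h
      intro x hx
      rcases ih _ h x hx with hin | ⟨p, hp, rest⟩
      · rcases pvLitsA_some_mem ci cj ci acc a1 hl x hin with hin' | ⟨l, hl', hc, he, hne⟩
        · exact Or.inl hin'
        · exact Or.inr ⟨(ci, cj), List.mem_cons_self, l, hl', hc, he, hne⟩
      · exact Or.inr ⟨p, List.mem_cons_of_mem _ hp, rest⟩

theorem pvAddNewA_nodup {acc : List (List Int)} (h : acc.Nodup) (r : List Int) :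
    (pvAddNewA acc r).Nodup := by
  unfold pvAddNewA
  split_ifs with hc
  · exact h
  · refine List.Nodup.append h (List.nodup_singleton _) ?_
    intro x hx hy
    simp only [List.mem_singleton] at hy
    subst hy
    exact hc (List.contains_iff_mem.2 hx)

theorem pvLitsA_nodup (ci cj : List Int) (ls : List Int) (acc acc' : List (List Int))
    (h : pvLitsA ci cj ls acc = some acc') (hnd : acc.Nodup) : acc'.Nodup := by
  induction ls generalizing acc with
  | nil => simp only [pvLitsA] at h; cases h; exact hnd
  | cons l ls ih =>
    simp only [pvLitsA] at h
    split_ifs at h with h1 h2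
    · exact ih _ h (pvAddNewA_nodup hnd _)
    · exact ih _ h hnd

theorem pvScanA_nodup (ps : List (List Int × List Int)) (acc acc' : List (List Int))
    (h : pvScanA ps acc = some acc') (hnd : acc.Nodup) : acc'.Nodup := by
  induction ps generalizing acc with
  | nil => simp only [pvScanA] at h; cases h; exact hnd
  | cons q ps ih =>
    obtain ⟨ci, cj⟩ := q
    simp only [pvScanA] at h
    cases hl : pvLitsA ci cj ci acc with
    | none => rw [hl] at h; cases h
    | some a1 =>
      rw [hl] at h
      exact ih _ h (pvLitsA_nodup ci cj ci acc a1 hl hnd)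

-- ===== invariant, cardinality bound, the A-side characterisation =====

def pvGood (U : List Int) (x : List Int) : Prop := pvStrict x ∧ ∀ a ∈ x, a ∈ U

def pvShape (s0C t : List (List Int)) : Prop :=
  ∃ e, t = s0C ++ e ∧ e.Nodup ∧ (∀ x ∈ e, x ∉ s0C)

def pvInvA (s0C : List (List Int)) (U : List Int) (t : List (List Int)) : Prop :=
  pvShape s0C t ∧ (∀ x ∈ t, pvGood U x) ∧ (∀ x ∈ t, pvDer s0C x)

theorem pv_card_bound {U : List Int} {e : List (List Int)} (hnd : e.Nodup)
    (hg : ∀ x ∈ e, pvGood U x) : e.length ≤ 2 ^ U.length := by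
  have hinj : Set.InjOn List.toFinset {x | x ∈ e.toFinset} := by
    intro x hx y hy hxy
    simp only [Set.mem_setOf_eq, List.mem_toFinset] at hx hy
    refine pvStrict_ext (hg x hx).1 (hg y hy).1 (fun a => ?_)
    constructor
    · intro ha
      have : a ∈ x.toFinset := List.mem_toFinset.2 ha
      rw [hxy] at this
      exact List.mem_toFinset.1 this
    · intro ha
      have : a ∈ y.toFinset := List.mem_toFinset.2 ha
      rw [← hxy] at this
      exact List.mem_toFinset.1 this
  have hcard1 : e.toFinset.card = e.length := List.toFinset_card_of_nodup hnd
  have hcard2 : (e.toFinset.image List.toFinset).card = e.toFinset.card :=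
    Finset.card_image_of_injOn hinj
  have hsub : e.toFinset.image List.toFinset ⊆ U.toFinset.powerset := by
    intro f hf
    obtain ⟨x, hx, rfl⟩ := Finset.mem_image.1 hf
    rw [Finset.mem_powerset]
    intro a ha
    exact List.mem_toFinset.2 ((hg x (List.mem_toFinset.1 hx)).2 a (List.mem_toFinset.1 ha))
  have hle : (e.toFinset.image List.toFinset).card ≤ U.toFinset.powerset.card :=
    Finset.card_le_card hsub
  rw [Finset.card_powerset] at hle
  have hU : U.toFinset.card ≤ U.length := List.toFinset_card_le U
  calc e.length = (e.toFinset.image List.toFinset).card := by omega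
    _ ≤ 2 ^ U.toFinset.card := hle
    _ ≤ 2 ^ U.length := Nat.pow_le_pow_right (by norm_num) hU

-- in a saturated list (round scan succeeded, nothing new) every admissible pair
-- has a nonempty resolvent that is already present
theorem pv_sat_resolvent {s0C t new : List (List Int)} (hsh : pvShape s0C t)
    (hscan : pvScanA (pvPairsA t) [] = some new)
    (hsub : ∀ x ∈ new, t.contains x = true)
    {C D : List Int} {l : Int} (hC : C ∈ t) (hD : D ∈ t) (hok : pvOk s0C C D)
    (hl : l ∈ C) (hnl : (-l) ∈ D) :
    pvResA C D l ≠ [] ∧ pvResA C D l ∈ t := by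
  obtain ⟨e, ht, hnd, hfresh⟩ := hsh
  have hmem_of_new : ∀ x, x ∈ new → x ∈ t := fun x hx => List.contains_iff_mem.1 (hsub x hx)
  by_cases hCD : C = D
  · subst hCD
    have hcount : 2 ≤ s0C.count C := by
      rcases hok with h | h
      · exact absurd rfl h
      · exact h
    obtain ⟨i, j, hij, hjlen, hi1, hj1⟩ := pv_two_pos_of_count hcount
    have hilen : i < s0C.length := by omega
    have hjt : j < t.length := by rw [ht, List.length_append]; omega
    have hgi : t.getD i [] = C := by rw [ht, List.getD_append _ _ _ _ hilen]; exact hi1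
    have hgj : t.getD j [] = C := by rw [ht, List.getD_append _ _ _ _ hjlen]; exact hj1
    have hp : ((C, C) : List Int × List Int) ∈ pvPairsA t :=
      mem_pvPairsA.2 ⟨i, j, hij, hjt, by rw [hgi, hgj]⟩
    obtain ⟨hne, hmem⟩ := pvScanA_cover _ _ _ hscan _ hp l hl (List.contains_iff_mem.2 hnl)
    exact ⟨hne, hmem_of_new _ hmem⟩
  · obtain ⟨i, hi, hgi⟩ := pv_pos_of_mem hC
    obtain ⟨j, hj, hgj⟩ := pv_pos_of_mem hD
    have hij : i ≠ j := by
      intro hEq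
      subst hEq
      exact hCD (hgi ▸ hgj ▸ rfl)
    by_cases hlt : i < j
    · have hp : ((C, D) : List Int × List Int) ∈ pvPairsA t :=
        mem_pvPairsA.2 ⟨i, j, hlt, hj, by rw [hgi, hgj]⟩
      obtain ⟨hne, hmem⟩ := pvScanA_cover _ _ _ hscan _ hp l hl (List.contains_iff_mem.2 hnl)
      exact ⟨hne, hmem_of_new _ hmem⟩
    · have hlt' : j < i := by omega
      have hp : ((D, C) : List Int × List Int) ∈ pvPairsA t :=
        mem_pvPairsA.2 ⟨j, i, hlt', hi, by rw [hgi, hgj]⟩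
      obtain ⟨hne, hmem⟩ := pvScanA_cover _ _ _ hscan _ hp (-l) hnl
        (List.contains_iff_mem.2 (by rw [neg_neg]; exact hl))
      rw [pvRes_comm] at hne hmem
      exact ⟨hne, hmem_of_new _ hmem⟩

theorem pv_der_mem {s0C t new : List (List Int)} (hsh : pvShape s0C t)
    (hscan : pvScanA (pvPairsA t) [] = some new)
    (hsub : ∀ x ∈ new, t.contains x = true) :
    ∀ C, pvDer s0C C → C ∈ t := by
  intro C h
  induction h with
  | base hC =>
    obtain ⟨e, ht, _, _⟩ := hsh
    rw [ht]
    exact List.mem_append_left _ (by assumption)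
  | step hC hD hok hl hnl hne ihC ihD =>
    exact (pv_sat_resolvent hsh hscan hsub ihC ihD hok hl hnl).2

theorem pv_sat_not_ED {s0C t new : List (List Int)} (hsh : pvShape s0C t)
    (hscan : pvScanA (pvPairsA t) [] = some new)
    (hsub : ∀ x ∈ new, t.contains x = true) : ¬ pvED s0C := by
  rintro ⟨C, D, l, hC, hD, hok, hl, hnl, hres⟩
  have hCt := pv_der_mem hsh hscan hsub C hC
  have hDt := pv_der_mem hsh hscan hsub D hD
  exact (pv_sat_resolvent hsh hscan hsub hCt hDt hok hl hnl).1 hres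

-- the ED fact extracted from a scanned pair with an empty resolvent, and the
-- derivability of freshly added resolvents
theorem pv_pair_data {s0C t : List (List Int)} {U : List Int} (hInv : pvInvA s0C U t)
    {p : List Int × List Int} (hp : p ∈ pvPairsA t) :
    pvDer s0C p.1 ∧ pvDer s0C p.2 ∧ pvOk s0C p.1 p.2 := by
  obtain ⟨⟨e, ht, hnd, hfresh⟩, hgood, hder⟩ := hInv
  obtain ⟨i, j, hij, hj, hpe⟩ := mem_pvPairsA.1 hp
  have hmi : p.1 ∈ t := by rw [hpe]; exact pv_mem_of_pos (by omega)
  have hmj : p.2 ∈ t := by rw [hpe]; exact pv_mem_of_pos hj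
  refine ⟨hder _ hmi, hder _ hmj, ?_⟩
  by_cases hEq : p.1 = p.2
  · refine Or.inr ?_
    have : 2 ≤ s0C.count (t.getD i []) :=
      pv_dup_prefix ht hnd hfresh hij hj (by
        have h1 : p.1 = t.getD i [] := by rw [hpe]
        have h2 : p.2 = t.getD j [] := by rw [hpe]
        rw [← h1, ← h2, hEq])
    have h1 : p.1 = t.getD i [] := by rw [hpe]
    rw [h1]
    exact this
  · exact Or.inl hEq

theorem pv_mainA (fuel : Nat) (s0C : List (List Int)) (U : List Int) (t : List (List Int))
    (hInv : pvInvA s0C U t)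
    (hfuel : s0C.length + 2 ^ U.length < fuel + t.length) :
    (pvLoopA fuel t = false ↔ pvED s0C) := by
  induction fuel generalizing t with
  | zero =>
    exfalso
    obtain ⟨⟨e, ht, hnd, hfresh⟩, hgood, _⟩ := hInv
    have hb : e.length ≤ 2 ^ U.length :=
      pv_card_bound hnd (fun x hx => hgood x (by rw [ht]; exact List.mem_append_right _ hx))
    have : t.length = s0C.length + e.length := by rw [ht, List.length_append]
    omega
  | succ fuel ih =>
    simp only [pvLoopA]
    cases hscan : pvScanA (pvPairsA t) [] with
    | none =>
      simp only [true_iff]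
      obtain ⟨p, hp, l, hl, hc, hres⟩ := pvScanA_none _ _ hscan
      obtain ⟨hd1, hd2, hok⟩ := pv_pair_data hInv hp
      exact ⟨p.1, p.2, l, hd1, hd2, hok, hl, List.contains_iff_mem.1 hc, hres⟩
    | some new =>
      show (if (new.all fun c => t.contains c) = true then true
        else pvLoopA fuel (t ++ new.filter (fun c => !t.contains c))) = false ↔ pvED s0C
      by_cases hall : (new.all fun c => t.contains c) = true
      · rw [if_pos hall]
        simp only [Bool.true_eq_false, false_iff]
        exact pv_sat_not_ED hInv.1 hscan (fun x hx => (List.all_eq_true.1 hall) x hx)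
      · rw [if_neg hall]
        obtain ⟨⟨e, ht, hnd, hfreshE⟩, hgood, hder⟩ := hInv
        set fr := new.filter (fun c => !t.contains c) with hfr
        have hnewnd : new.Nodup := pvScanA_nodup _ _ _ hscan List.nodup_nil
        have hfr_not : ∀ x ∈ fr, x ∉ t := by
          intro x hx
          have := List.of_mem_filter hx
          simp only [Bool.not_eq_eq_eq_not, Bool.not_true] at this
          intro hm
          rw [List.contains_iff_mem.2 hm] at this
          cases this
        have hprov : ∀ x ∈ new, x ∈ t ∨
            ∃ p ∈ pvPairsA t, ∃ l ∈ p.1, p.2.contains (-l) = true ∧ x = pvResA p.1 p.2 l ∧ x ≠ [] := by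
          intro x hx
          rcases pvScanA_some_mem _ _ _ hscan x hx with hin | h
          · cases hin
          · exact Or.inr h
        have hInv' : pvInvA s0C U (t ++ fr) := by
          refine ⟨⟨e ++ fr, by rw [ht, List.append_assoc], ?_, ?_⟩, ?_, ?_⟩
          · refine List.Nodup.append hnd (List.Nodup.filter _ hnewnd) ?_
            intro x hxe hxf
            exact hfr_not x hxf (by rw [ht]; exact List.mem_append_right _ hxe)
          · intro x hx
            rcases List.mem_append.1 hx with hx | hx
            · exact hfreshE x hx
            · intro hm
              exact hfr_not x hx (by rw [ht]; exact List.mem_append_left _ hm)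
          · intro x hx
            rcases List.mem_append.1 hx with hx | hx
            · exact hgood x hx
            · have hxnew : x ∈ new := List.mem_of_mem_filter hx
              rcases hprov x hxnew with hin | ⟨p, hp, l, hl, hc, hEq, hne⟩
              · exact hgood x hin
              · obtain ⟨i, j, hij, hj, hpe⟩ := mem_pvPairsA.1 hp
                have hmi : p.1 ∈ t := by rw [hpe]; exact pv_mem_of_pos (by omega)
                have hmj : p.2 ∈ t := by rw [hpe]; exact pv_mem_of_pos hj
                subst hEq
                refine ⟨pvRes_strict _ _ _, ?_⟩
                intro a ha
                rcases (mem_pvRes a _ _ _).1 ha with ⟨ha1, _⟩ | ⟨ha2, _⟩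
                · exact (hgood _ hmi).2 a ha1
                · exact (hgood _ hmj).2 a ha2
          · intro x hx
            rcases List.mem_append.1 hx with hx | hx
            · exact hder x hx
            · have hxnew : x ∈ new := List.mem_of_mem_filter hx
              rcases hprov x hxnew with hin | ⟨p, hp, l, hl, hc, hEq, hne⟩
              · exact hder x hin
              · obtain ⟨hd1, hd2, hok⟩ := pv_pair_data (U := U) ⟨⟨e, ht, hnd, hfreshE⟩, hgood, hder⟩ hp
                subst hEq
                exact pvDer.step hd1 hd2 hok hl (List.contains_iff_mem.1 hc) hne
        have hfr_ne : fr ≠ [] := by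
          intro hEq
          apply hall
          rw [List.all_eq_true]
          intro x hx
          by_cases hc : t.contains x = true
          · exact hc
          · exfalso
            have hxf : x ∈ fr := by
              rw [hfr]
              refine List.mem_filter.2 ⟨hx, ?_⟩
              simp only [Bool.not_eq_eq_eq_not, Bool.not_true]
              exact Bool.of_not_eq_true hc
            rw [hEq] at hxf
            cases hxf
        have hlen : 1 ≤ fr.length := by
          cases hfr' : fr with
          | nil => exact absurd hfr' hfr_ne
          | cons a as => simp
        refine ih (t ++ fr) hInv' ?_
        rw [List.length_append]
        omega

-- ===== B-side processing lemmas =====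

theorem pvBucketB_none (g : List Int) (l : Int) (hs : List (List Int))
    (seen nq : List (List Int)) (h : pvBucketB g l hs (seen, nq) = none) :
    ∃ h' ∈ hs, pvResA g h' l = [] := by
  induction hs generalizing seen nq with
  | nil => simp [pvBucketB] at h
  | cons h0 hs ih =>
    simp only [pvBucketB, pvResB_eq] at h
    split_ifs at h with h1 h2
    · exact ⟨h0, List.mem_cons_self, h1⟩
    · obtain ⟨h', hm, he⟩ := ih _ _ h
      exact ⟨h', List.mem_cons_of_mem _ hm, he⟩
    · obtain ⟨h', hm, he⟩ := ih _ _ h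
      exact ⟨h', List.mem_cons_of_mem _ hm, he⟩

theorem pvBucketB_some (g : List Int) (l : Int) (hs : List (List Int))
    (seen nq seen' nq' : List (List Int))
    (h : pvBucketB g l hs (seen, nq) = some (seen', nq')) :
    ∃ add, seen' = seen ++ add ∧ nq' = nq ++ add ∧ add.Nodup ∧ (∀ x ∈ add, x ∉ seen) ∧
      (∀ x ∈ add, ∃ h' ∈ hs, x = pvResA g h' l ∧ x ≠ []) ∧
      (∀ h' ∈ hs, pvResA g h' l ≠ [] ∧ pvResA g h' l ∈ seen') := by
  induction hs generalizing seen nq with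
  | nil =>
    simp only [pvBucketB, Option.some.injEq, Prod.mk.injEq] at h
    obtain ⟨h1, h2⟩ := h
    exact ⟨[], by simp [h1.symm], by simp [h2.symm], List.nodup_nil, by simp, by simp, by simp⟩
  | cons h0 hs ih =>
    simp only [pvBucketB, pvResB_eq] at h
    split_ifs at h with h1 h2
    · -- r already seen
      obtain ⟨add, hseq, hnq, hnd, hfr, hprov, hcov⟩ := ih _ _ h
      have hr : pvResA g h0 l ∈ seen := by
        have := h2
        simpa [PySem.Set.contains] using this
      refine ⟨add, hseq, hnq, hnd, hfr, ?_, ?_⟩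
      · intro x hx
        obtain ⟨h', hm, he⟩ := hprov x hx
        exact ⟨h', List.mem_cons_of_mem _ hm, he⟩
      · intro h' hm
        rcases List.mem_cons.1 hm with rfl | hm'
        · exact ⟨h1, by rw [hseq]; exact List.mem_append_left _ hr⟩
        · exact hcov h' hm'
    · -- fresh r
      have hadd : PySem.Set.add seen (pvResA g h0 l) = seen ++ [pvResA g h0 l] := by
        simp only [PySem.Set.add]
        rw [if_neg h2]
      rw [hadd] at h
      obtain ⟨add, hseq, hnq, hnd, hfr, hprov, hcov⟩ := ih _ _ h
      have hrn : pvResA g h0 l ∉ seen := by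
        intro hm
        exact h2 (by simpa [PySem.Set.contains] using hm)
      refine ⟨pvResA g h0 l :: add, ?_, ?_, ?_, ?_, ?_, ?_⟩
      · rw [hseq, List.append_assoc]; rfl
      · rw [hnq, List.append_assoc]; rfl
      · refine List.nodup_cons.2 ⟨?_, hnd⟩
        intro hm
        exact hfr _ hm (List.mem_append_right _ (List.mem_singleton.2 rfl))
      · intro x hx
        rcases List.mem_cons.1 hx with rfl | hx'
        · exact hrn
        · intro hm
          exact hfr x hx' (List.mem_append_left _ hm)
      · intro x hx
        rcases List.mem_cons.1 hx with rfl | hx'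
        · exact ⟨h0, List.mem_cons_self, rfl, h1⟩
        · obtain ⟨h', hm, he⟩ := hprov x hx'
          exact ⟨h', List.mem_cons_of_mem _ hm, he⟩
      · intro h' hm
        rcases List.mem_cons.1 hm with rfl | hm'
        · refine ⟨h1, ?_⟩
          rw [hseq]
          exact List.mem_append_left _ (List.mem_append_right _ (List.mem_singleton.2 rfl))
        · exact hcov h' hm'

theorem pvLitsB_none (idx : PySem.Dict Int (List (List Int))) (g : List Int)
    (ls : List Int) (seen nq : List (List Int))
    (h : pvLitsB idx g ls (seen, nq) = none) :
    ∃ l ∈ ls, ∃ h' ∈ idx.getD (-l) [], pvResA g h' l = [] := by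
  induction ls generalizing seen nq with
  | nil => simp [pvLitsB] at h
  | cons l ls ih =>
    simp only [pvLitsB] at h
    cases hb : pvBucketB g l (idx.getD (-l) []) (seen, nq) with
    | none =>
      obtain ⟨h', hm, he⟩ := pvBucketB_none _ _ _ _ _ hb
      exact ⟨l, List.mem_cons_self, h', hm, he⟩
    | some st' =>
      rw [hb] at h
      obtain ⟨seen1, nq1⟩ := st'
      obtain ⟨l', hl', rest⟩ := ih _ _ h
      exact ⟨l', List.mem_cons_of_mem _ hl', rest⟩

theorem pvLitsB_some (idx : PySem.Dict Int (List (List Int))) (g : List Int)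
    (ls : List Int) (seen nq seen' nq' : List (List Int))
    (h : pvLitsB idx g ls (seen, nq) = some (seen', nq')) :
    ∃ add, seen' = seen ++ add ∧ nq' = nq ++ add ∧ add.Nodup ∧ (∀ x ∈ add, x ∉ seen) ∧
      (∀ x ∈ add, ∃ l ∈ ls, ∃ h' ∈ idx.getD (-l) [], x = pvResA g h' l ∧ x ≠ []) ∧
      (∀ l ∈ ls, ∀ h' ∈ idx.getD (-l) [], pvResA g h' l ≠ [] ∧ pvResA g h' l ∈ seen') := by
  induction ls generalizing seen nq with
  | nil =>
    simp only [pvLitsB, Option.some.injEq, Prod.mk.injEq] at h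
    obtain ⟨h1, h2⟩ := h
    exact ⟨[], by simp [h1.symm], by simp [h2.symm], List.nodup_nil, by simp, by simp, by simp⟩
  | cons l ls ih =>
    simp only [pvLitsB] at h
    cases hb : pvBucketB g l (idx.getD (-l) []) (seen, nq) with
    | none => rw [hb] at h; cases h
    | some st' =>
      rw [hb] at h
      obtain ⟨seen1, nq1⟩ := st'
      obtain ⟨add1, hs1, hn1, hnd1, hfr1, hprov1, hcov1⟩ := pvBucketB_some _ _ _ _ _ _ _ hb
      obtain ⟨add2, hs2, hn2, hnd2, hfr2, hprov2, hcov2⟩ := ih _ _ h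
      refine ⟨add1 ++ add2, ?_, ?_, ?_, ?_, ?_, ?_⟩
      · rw [hs2, hs1, List.append_assoc]
      · rw [hn2, hn1, List.append_assoc]
      · refine List.Nodup.append hnd1 hnd2 ?_
        intro x hx1 hx2
        exact hfr2 x hx2 (by rw [hs1]; exact List.mem_append_right _ hx1)
      · intro x hx
        rcases List.mem_append.1 hx with hx | hx
        · exact hfr1 x hx
        · intro hm
          exact hfr2 x hx (by rw [hs1]; exact List.mem_append_left _ hm)
      · intro x hx
        rcases List.mem_append.1 hx with hx | hx
        · obtain ⟨h', hm, he, hne⟩ := hprov1 x hx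
          exact ⟨l, List.mem_cons_self, h', hm, he, hne⟩
        · obtain ⟨l', hl', rest⟩ := hprov2 x hx
          exact ⟨l', List.mem_cons_of_mem _ hl', rest⟩
      · intro l' hl' h' hm
        rcases List.mem_cons.1 hl' with rfl | hl''
        · obtain ⟨hne, hmem⟩ := hcov1 h' hm
          refine ⟨hne, ?_⟩
          rw [hs2]
          exact List.mem_append_left _ hmem
        · exact hcov2 l' hl'' h' hm

theorem pvIndexAdd_getD (g : List Int) (idx : PySem.Dict Int (List (List Int)))
    (hnd : g.Nodup) (l : Int) :
    (pvIndexAddB idx g).getD l [] =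
      if l ∈ g then idx.getD l [] ++ [g] else idx.getD l [] := by
  suffices hgen : ∀ (ls : List Int) (d : PySem.Dict Int (List (List Int))), ls.Nodup →
      (ls.foldl (fun d' l' => d'.insert l' (d'.getD l' [] ++ [g])) d).getD l [] =
        if l ∈ ls then d.getD l [] ++ [g] else d.getD l [] by
    exact hgen g idx hnd
  intro ls
  induction ls with
  | nil => intro d _; simp
  | cons a as ih =>
    intro d hnd'
    simp only [List.foldl_cons]
    rw [ih _ (List.Nodup.of_cons hnd')]
    by_cases hla : l = a
    · subst hla
      have hnotin : l ∉ as := (List.nodup_cons.1 hnd').1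
      rw [if_neg hnotin, if_pos List.mem_cons_self]
      rw [PySem.Dict.getD_insert, if_pos rfl]
    · rw [PySem.Dict.getD_insert, if_neg hla]
      by_cases hlas : l ∈ as
      · rw [if_pos hlas, if_pos (List.mem_cons_of_mem _ hlas)]
      · rw [if_neg hlas, if_neg (by
          intro hm
          rcases List.mem_cons.1 hm with h | h
          · exact hla h
          · exact hlas h)]

-- ===== B-side invariants and main lemma =====

def pvIdxOk (done : List (List Int)) (idx : PySem.Dict Int (List (List Int))) : Prop :=
  ∀ l h, (h ∈ idx.getD l [] → l ∈ h ∧ h ∈ done) ∧ (h ∈ done → l ∈ h → h ∈ idx.getD l [])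

def pvDoneRes (done seen : List (List Int)) : Prop :=
  ∀ i j, i < j → j < done.length → ∀ l, l ∈ done.getD i [] → (-l) ∈ done.getD j [] →
    pvResA (done.getD i []) (done.getD j []) l ≠ [] ∧
    pvResA (done.getD i []) (done.getD j []) l ∈ seen

theorem pv_dup_count {s0C e q : List (List Int)} (hq : q = s0C ++ e) (hnd : e.Nodup)
    (hfresh : ∀ x ∈ e, x ∉ s0C) {C : List Int} (h2 : 2 ≤ q.count C) : 2 ≤ s0C.count C := by
  subst hq
  rw [List.count_append] at h2
  by_cases hCe : C ∈ e
  · exfalso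
    have h0 : s0C.count C = 0 := List.count_eq_zero_of_not_mem (hfresh C hCe)
    have h1 : e.count C ≤ 1 := List.nodup_iff_count_le_one.1 hnd C
    omega
  · have h0 : e.count C = 0 := List.count_eq_zero_of_not_mem hCe
    omega

def pvClosed (s0C t : List (List Int)) : Prop :=
  ∀ C D l, C ∈ t → D ∈ t → pvOk s0C C D → l ∈ C → (-l) ∈ D →
    pvResA C D l ≠ [] ∧ pvResA C D l ∈ t

theorem pv_closed_not_ED {s0C t : List (List Int)} (hpre : ∀ x ∈ s0C, x ∈ t)
    (hcl : pvClosed s0C t) : ¬ pvED s0C := by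
  have hmem : ∀ C, pvDer s0C C → C ∈ t := by
    intro C h
    induction h with
    | base hC => exact hpre _ hC
    | step hC hD hok hl hnl hne ihC ihD => exact (hcl _ _ _ ihC ihD hok hl hnl).2
  rintro ⟨C, D, l, hC, hD, hok, hl, hnl, hres⟩
  exact (hcl _ _ _ (hmem C hC) (hmem D hD) hok hl hnl).1 hres

-- a fully processed worklist is closed
theorem pv_doneClosed {s0C e done seen : List (List Int)} (hsh : done = s0C ++ e)
    (_hnd : e.Nodup) (_hfresh : ∀ x ∈ e, x ∉ s0C)
    (hseen : ∀ x, x ∈ seen ↔ x ∈ done) (hdres : pvDoneRes done seen) :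
    pvClosed s0C done := by
  intro C D l hC hD hok hl hnl
  have hmem_seen : ∀ x, x ∈ seen → x ∈ done := fun x hx => (hseen x).1 hx
  by_cases hCD : C = D
  · subst hCD
    have hcount : 2 ≤ s0C.count C := by
      rcases hok with h | h
      · exact absurd rfl h
      · exact h
    obtain ⟨i, j, hij, hjlen, hi1, hj1⟩ := pv_two_pos_of_count hcount
    have hilen : i < s0C.length := by omega
    have hjt : j < done.length := by rw [hsh, List.length_append]; omega
    have hgi : done.getD i [] = C := by rw [hsh, List.getD_append _ _ _ _ hilen]; exact hi1
    have hgj : done.getD j [] = C := by rw [hsh, List.getD_append _ _ _ _ hjlen]; exact hj1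
    have := hdres i j hij hjt l (by rw [hgi]; exact hl) (by rw [hgj]; exact hnl)
    rw [hgi, hgj] at this
    exact ⟨this.1, hmem_seen _ this.2⟩
  · obtain ⟨i, hi, hgi⟩ := pv_pos_of_mem hC
    obtain ⟨j, hj, hgj⟩ := pv_pos_of_mem hD
    have hij : i ≠ j := by
      intro hEq
      subst hEq
      exact hCD (hgi ▸ hgj ▸ rfl)
    by_cases hlt : i < j
    · have := hdres i j hlt hj l (by rw [hgi]; exact hl) (by rw [hgj]; exact hnl)
      rw [hgi, hgj] at this
      exact ⟨this.1, hmem_seen _ this.2⟩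
    · have hlt' : j < i := by omega
      have := hdres j i hlt' hi (-l) (by rw [hgj]; exact hnl)
        (by rw [hgi, neg_neg]; exact hl)
      rw [hgi, hgj] at this
      rw [pvRes_comm] at this
      exact ⟨this.1, hmem_seen _ this.2⟩

theorem pv_mainB (fuel : Nat) (s0C e : List (List Int)) (U : List Int)
    (done pend seen : List (List Int)) (idx : PySem.Dict Int (List (List Int)))
    (hsh : done ++ pend = s0C ++ e) (hnd : e.Nodup) (hfresh : ∀ x ∈ e, x ∉ s0C)
    (hseen : ∀ x, x ∈ seen ↔ x ∈ done ++ pend)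
    (hgood : ∀ x ∈ done ++ pend, pvGood U x)
    (hder : ∀ x ∈ done ++ pend, pvDer s0C x)
    (hidx : pvIdxOk done idx)
    (hdres : pvDoneRes done seen)
    (hfuel : pend.length + 2 ^ U.length < fuel + e.length) :
    (pvLoopB fuel pend idx seen = false ↔ pvED s0C) := by
  induction fuel generalizing e done pend seen idx with
  | zero =>
    exfalso
    have hb : e.length ≤ 2 ^ U.length := by
      refine pv_card_bound hnd (fun x hx => hgood x ?_)
      rw [hsh]
      exact List.mem_append_right _ hx
    omega
  | succ fuel ih =>
    cases pend with
    | nil =>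
      simp only [pvLoopB]
      simp only [Bool.true_eq_false, false_iff]
      rw [List.append_nil] at hsh hseen hgood hder
      exact pv_closed_not_ED
        (fun x hx => by rw [hsh]; exact List.mem_append_left _ hx)
        (pv_doneClosed hsh hnd hfresh hseen hdres)
    | cons g pend =>
      show (match pvLitsB idx g g (seen, []) with
        | none => false
        | some (seen', nq) => pvLoopB fuel (pend ++ nq) (pvIndexAddB idx g) seen') = false ↔ pvED s0C
      have hg_mem : g ∈ done ++ g :: pend :=
        List.mem_append_right _ List.mem_cons_self
      have hOk_of_bucket : ∀ h', h' ∈ done → pvOk s0C g h' := by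
        intro h' hmem
        by_cases hEq : g = h'
        · refine Or.inr ?_
          subst hEq
          refine pv_dup_count hsh hnd hfresh ?_
          have hc1 : 1 ≤ done.count g := List.count_pos_iff.2 hmem
          have hc2 : 1 ≤ (g :: pend).count g := by
            have : (g :: pend).count g = pend.count g + 1 := List.count_cons_self
            omega
          rw [List.count_append]
          omega
        · exact Or.inl hEq
      cases hproc : pvLitsB idx g g (seen, []) with
      | none =>
        simp only [true_iff]
        obtain ⟨l, hl, h', hm, he⟩ := pvLitsB_none _ _ _ _ _ hproc
        obtain ⟨hlh, hhd⟩ := (hidx (-l) h').1 hm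
        refine ⟨g, h', l, hder _ hg_mem, hder _ (List.mem_append_left _ hhd),
          hOk_of_bucket h' hhd, hl, hlh, he⟩
      | some st =>
        obtain ⟨seen', nq⟩ := st
        obtain ⟨add, hs1, hn1, hndadd, hfradd, hprov, hcov⟩ := pvLitsB_some _ _ _ _ _ _ _ hproc
        have hnq : nq = add := by simpa using hn1
        subst hnq
        have hgnd : g.Nodup := ((hgood g hg_mem).1).nodup
        have hidxg := fun l => pvIndexAdd_getD g idx hgnd l
        -- freshness of nq with respect to everything so far
        have hfradd' : ∀ x ∈ nq, x ∉ done ++ g :: pend := by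
          intro x hx hm
          exact hfradd x hx ((hseen x).2 hm)
        -- provenance data for each nqed clause
        have hprov' : ∀ x ∈ nq, ∃ h', h' ∈ done ∧ (∃ l, l ∈ g ∧ (-l) ∈ h' ∧
            x = pvResA g h' l ∧ x ≠ []) := by
          intro x hx
          obtain ⟨l, hl, h', hm, he, hne⟩ := hprov x hx
          obtain ⟨hlh, hhd⟩ := (hidx (-l) h').1 hm
          exact ⟨h', hhd, l, hl, hlh, he, hne⟩
        refine (ih (e ++ nq) (done ++ [g]) (pend ++ nq) seen' (pvIndexAddB idx g)
          ?_ ?_ ?_ ?_ ?_ ?_ ?_ ?_ ?_)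
        · simpa using congrArg (· ++ nq) hsh
        · refine List.Nodup.append hnd hndadd ?_
          intro x hxe hxa
          exact hfradd' x hxa (by rw [hsh]; exact List.mem_append_right _ hxe)
        · intro x hx
          rcases List.mem_append.1 hx with hx | hx
          · exact hfresh x hx
          · intro hm
            exact hfradd' x hx (by rw [hsh]; exact List.mem_append_left _ hm)
        · intro x
          rw [hs1]
          simp only [List.mem_append, List.mem_cons]
          have h0 := hseen x
          simp only [List.mem_append, List.mem_cons] at h0
          tauto
        · -- pvGood is preserved
          intro x hx
          have hx' : x ∈ (done ++ g :: pend) ∨ x ∈ nq := by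
            simp only [List.mem_append, List.mem_cons] at hx ⊢
            tauto
          rcases hx' with hx' | hx'
          · exact hgood x hx'
          · obtain ⟨h', hhd, l, hl, hlh, hEq, hne⟩ := hprov' x hx'
            subst hEq
            refine ⟨pvRes_strict _ _ _, ?_⟩
            intro a ha
            rcases (mem_pvRes a _ _ _).1 ha with ⟨ha1, _⟩ | ⟨ha2, _⟩
            · exact (hgood g hg_mem).2 a ha1
            · exact (hgood h' (List.mem_append_left _ hhd)).2 a ha2
        · -- pvDer is preserved
          intro x hx
          have hx' : x ∈ (done ++ g :: pend) ∨ x ∈ nq := by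
            simp only [List.mem_append, List.mem_cons] at hx ⊢
            tauto
          rcases hx' with hx' | hx'
          · exact hder x hx'
          · obtain ⟨h', hhd, l, hl, hlh, hEq, hne⟩ := hprov' x hx'
            subst hEq
            exact pvDer.step (hder _ hg_mem) (hder _ (List.mem_append_left _ hhd))
              (hOk_of_bucket h' hhd) hl hlh hne
        · -- index invariant
          intro l h'
          rw [hidxg l]
          constructor
          · intro hm
            by_cases hlg : l ∈ g
            · rw [if_pos hlg] at hm
              rcases List.mem_append.1 hm with hm | hm
              · obtain ⟨h1, h2⟩ := (hidx l h').1 hm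
                exact ⟨h1, List.mem_append_left _ h2⟩
              · have : h' = g := List.mem_singleton.1 hm
                subst this
                exact ⟨hlg, List.mem_append_right _ (List.mem_singleton.2 rfl)⟩
            · rw [if_neg hlg] at hm
              obtain ⟨h1, h2⟩ := (hidx l h').1 hm
              exact ⟨h1, List.mem_append_left _ h2⟩
          · intro hmem hlh
            rcases List.mem_append.1 hmem with hm | hm
            · have := (hidx l h').2 hm hlh
              by_cases hlg : l ∈ g
              · rw [if_pos hlg]
                exact List.mem_append_left _ this
              · rw [if_neg hlg]
                exact this
            · have : h' = g := List.mem_singleton.1 hm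
              subst this
              rw [if_pos hlh]
              exact List.mem_append_right _ (List.mem_singleton.2 rfl)
        · -- all processed pairs are resolved into seen'
          intro i j hij hj l hl hnl
          have hlen : (done ++ [g]).length = done.length + 1 := by simp
          by_cases hjd : j < done.length
          · have hid : i < done.length := by omega
            rw [List.getD_append _ _ _ _ hjd] at hnl ⊢
            rw [List.getD_append _ _ _ _ hid] at hl ⊢
            obtain ⟨h1, h2⟩ := hdres i j hij hjd l hl hnl
            refine ⟨h1, ?_⟩
            rw [hs1]
            exact List.mem_append_left _ h2
          · have hjg : j = done.length := by omega
            have hgj : (done ++ [g]).getD j [] = g := by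
              subst hjg
              rw [List.getD_append_right _ _ _ _ (le_refl _)]
              simp
            have hid : i < done.length := by omega
            rw [hgj] at hnl ⊢
            rw [List.getD_append _ _ _ _ hid] at hl ⊢
            set C := done.getD i [] with hC
            have hCd : C ∈ done := pv_mem_of_pos hid
            have hbucket : C ∈ idx.getD l [] := (hidx l C).2 hCd hl
            have := hcov (-l) hnl C (by rw [neg_neg]; exact hbucket)
            rw [pvRes_comm] at this
            exact this
        · -- fuel budget
          simp only [List.length_cons] at hfuel
          simp only [List.length_append]
          omega

-- ===== VERDICT (by name: the statement is the Claim_ definition above) =====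
theorem resolution_simple_spec : Claim_equal_resolution_simple := by
  intro clauses _
  unfold Spec_resolution_simple resolution_simple resolution_simple_alt
  show pvLoopA (2 ^ (pvFzA clauses.flatten).length + (clauses.map pvFzA).length + 2)
      (clauses.map pvFzA) =
    pvLoopB ((clauses.map pvFzA).length + 2 ^ (pvFzA clauses.flatten).length + 1)
      (clauses.map pvFzA) PySem.Dict.empty (PySem.Set.ofList (clauses.map pvFzA))
  set s := clauses.map pvFzA with hsdef
  set U := pvFzA clauses.flatten with hUdef
  have hgood0 : ∀ x ∈ s, pvGood U x := by
    intro x hx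
    obtain ⟨c, hc, rfl⟩ := List.mem_map.1 hx
    refine ⟨pvFz_strict c, ?_⟩
    intro a ha
    rw [hUdef, mem_pvFz]
    exact List.mem_flatten.2 ⟨c, hc, (mem_pvFz a c).1 ha⟩
  have hInvA0 : pvInvA s U s := by
    refine ⟨⟨[], (List.append_nil s).symm, List.nodup_nil, by simp⟩, hgood0, ?_⟩
    intro x hx
    exact pvDer.base hx
  have hA := pv_mainA (2 ^ U.length + s.length + 2) s U s hInvA0 (by
    have h2 : (0:Nat) < 2 ^ U.length := Nat.two_pow_pos U.length
    omega)
  have hidx0 : pvIdxOk [] (PySem.Dict.empty : PySem.Dict Int (List (List Int))) := by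
    intro l h
    constructor
    · intro hm
      simp [PySem.Dict.getD, PySem.Dict.get?, PySem.Dict.empty] at hm
    · intro hm
      simp at hm
  have hB := pv_mainB (s.length + 2 ^ U.length + 1) s [] U [] s (PySem.Set.ofList s)
    PySem.Dict.empty (by simp) List.nodup_nil (by simp)
    (fun x => by simp only [List.nil_append]; exact PySem.Set.mem_ofList s x)
    (by simp only [List.nil_append]; exact hgood0)
    (by
      intro x hx
      simp only [List.nil_append] at hx
      exact pvDer.base hx)
    hidx0
    (by intro i j hij hj l; simp at hj)
    (by omega)
  cases hx : pvLoopA (2 ^ U.length + s.length + 2) s with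
  | false => exact (hB.2 (hA.1 hx)).symm
  | true =>
    cases hy : pvLoopB (s.length + 2 ^ U.length + 1) s PySem.Dict.empty (PySem.Set.ofList s) with
    | false =>
      exfalso
      have hED := hB.1 hy
      rw [hA.2 hED] at hx
      cases hx
    | true => rfl
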